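-- pv_equiv track=rewrite | github.com/Elias-Giannakidis/excel_calendar | Person.py | getRepoSeriScore
-- ===== SOURCE A (Python) =====
-- def getRepoSeriScore(calendar):
--     lastDayRepo = False
--     twoDaysSeri = False
--     score = 0
--     repo = 0
--     for day in calendar:
--         if(day == 'repo' and lastDayRepo):
--             repo = repo + 1
--             score = score - repo
--             twoDaysSeri = True
--             lastDayRepo = False
--         else:
--             if( day == 'repo' and not lastDayRepo):
--                 repo = repo + 1
--                 score = score - repo
--                 lastDayRepo = True
--         if(day != 'repo'):
--             lastDayRepo = False
--     if twoDaysSeri: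
--         score = score + 10
--     return score
-- ===== SOURCE B (Python) =====
-- def getRepoSeriScore(calendar):
--     k = calendar.count('repo')
--     adjacent = any(x == 'repo' and y == 'repo' for x, y in zip(calendar, calendar[1:]))
--     return -k * (k + 1) // 2 + (10 if adjacent else 0)
-- ===== Notes on version B (the rewrite author's own statement) =====
-- stated objective: simpler
-- what changed: Replaces the stateful four-variable loop with a closed form: the score is -k*(k+1)//2 for k = count of 'repo' days, plus 10 iff two consecutive days are both 'repo' (a separate zip-adjacency scan).
import Mathlib
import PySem

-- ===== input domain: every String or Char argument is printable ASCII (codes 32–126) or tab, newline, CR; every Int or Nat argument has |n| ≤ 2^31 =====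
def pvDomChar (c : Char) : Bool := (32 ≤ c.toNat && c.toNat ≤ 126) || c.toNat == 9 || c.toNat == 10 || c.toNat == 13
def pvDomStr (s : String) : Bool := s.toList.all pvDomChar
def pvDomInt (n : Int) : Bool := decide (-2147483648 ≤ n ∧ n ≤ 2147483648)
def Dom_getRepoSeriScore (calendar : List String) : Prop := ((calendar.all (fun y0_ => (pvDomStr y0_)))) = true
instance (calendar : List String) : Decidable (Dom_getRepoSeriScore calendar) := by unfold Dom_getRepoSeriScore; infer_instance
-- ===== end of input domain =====

-- B replaces A's stateful four-variable loop by a closed form -k*(k+1)//2 from the 'repo' count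
-- plus a separate adjacency scan for the +10 bonus (objective: simpler).


-- ===== PORT A =====
-- state = (lastDayRepo, twoDaysSeri, score, repo); one step of A's for-loop body
def pvStepA (st : Bool × Bool × Int × Int) (day : String) : Bool × Bool × Int × Int :=
  let (lastDayRepo, twoDaysSeri, score, repo) := st
  let (lastDayRepo, twoDaysSeri, score, repo) :=
    if day == "repo" && lastDayRepo then
      (false, true, score - (repo + 1), repo + 1)
    else if day == "repo" && !lastDayRepo then
      (true, twoDaysSeri, score - (repo + 1), repo + 1)
    else
      (lastDayRepo, twoDaysSeri, score, repo)
  if day != "repo" then (false, twoDaysSeri, score, repo)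
  else (lastDayRepo, twoDaysSeri, score, repo)

def getRepoSeriScore (calendar : List String) : Int :=
  let st := calendar.foldl pvStepA (false, false, (0 : Int), (0 : Int))
  if st.2.1 then st.2.2.1 + 10 else st.2.2.1

-- ===== PORT B =====
def getRepoSeriScore_alt (calendar : List String) : Int :=
  let k : Int := PySem.List.count calendar "repo"
  let adjacent := ((calendar.zip (PySem.List.slice calendar (some 1) none)).any
    (fun p => p.1 == "repo" && p.2 == "repo"))
  PySem.Int.floordiv (-k * (k + 1)) 2 + (if adjacent then 10 else 0)

-- ===== PRECONDITION & SPEC =====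
def Spec_getRepoSeriScore (calendar : List String) (out : Int) : Prop := out = getRepoSeriScore_alt calendar
instance (calendar : List String) (out : Int) : Decidable (Spec_getRepoSeriScore calendar out) := by unfold Spec_getRepoSeriScore; infer_instance

-- ===== CLAIM (what is proved, stated in full; the proofs are below) =====
def Claim_equal_getRepoSeriScore : Prop := ∀ (calendar : List String), Dom_getRepoSeriScore calendar → Spec_getRepoSeriScore calendar (getRepoSeriScore calendar)


-- ===== LEMMAS AND PROOFS =====

-- B's adjacency scan as a predicate on the list
def pvAdj (cal : List String) : Bool :=
  (cal.zip cal.tail).any (fun p => p.1 == "repo" && p.2 == "repo")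

-- the lastDayRepo flag after A's loop (only used inside the invariant; the result never reads it)
def pvLast (last : Bool) : List String -> Bool
| [] => last
| d :: t => pvLast (if d == "repo" then !last else false) t

-- the triangular number k*(k+1)/2 (exact Nat division)
def pvTri (k : Nat) : Int := ((k * (k + 1)) / 2 : Nat)

lemma pvTri_succ (k : Nat) : pvTri (k + 1) = pvTri k + (k + 1) := by
  unfold pvTri
  have h2 : k * (k + 1) % 2 = 0 := Nat.even_iff.mp (Nat.even_mul_succ_self k)
  have h : (k + 1) * (k + 1 + 1) = k * (k + 1) + 2 * (k + 1) := by ring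
  rw [h]
  push_cast
  omega

lemma pvAdj_cons (d : String) (t : List String) :
    pvAdj (d :: t) = ((d == "repo" && decide (t.head? = some "repo")) || pvAdj t) := by
  cases t with
  | nil => simp [pvAdj]
  | cons e t' => by_cases he : e = "repo" <;> simp [pvAdj, List.any_cons, he]

-- loop invariant for A's fold
lemma foldA_inv (cal : List String) : forall (last two : Bool) (score repo : Int),
    cal.foldl pvStepA (last, two, score, repo) =
      (pvLast last cal,
       (two || (last && decide (cal.head? = some "repo")) || pvAdj cal),
       score - (cal.count "repo" : Int) * repo - pvTri (cal.count "repo"),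
       repo + cal.count "repo") := by
  induction cal with
  | nil => intro last two score repo; simp [pvAdj, pvLast, pvTri]
  | cons d t ih =>
    intro last two score repo
    rw [List.foldl_cons, pvAdj_cons]
    by_cases hd : d = "repo"
    . subst hd
      cases last with
      | true =>
        simp only [pvStepA, ih, pvLast, List.count_cons, List.head?]
        simp [pvTri_succ]
        constructor <;> ring
      | false =>
        simp only [pvStepA, ih, pvLast, List.count_cons, List.head?]
        simp [pvTri_succ, Bool.or_assoc]
        constructor <;> ring
    . have hbe : (d == "repo") = false := by simp [hd]
      simp only [pvStepA, ih, pvLast, List.count_cons, List.head?, hbe]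
      simp [hd]

theorem getRepoSeriScore_spec : Claim_equal_getRepoSeriScore := by
  unfold Claim_equal_getRepoSeriScore
  intro cal _
  unfold Spec_getRepoSeriScore getRepoSeriScore getRepoSeriScore_alt
  rw [foldA_inv]
  rw [PySem.List.slice_from_one, PySem.List.count_eq]
  have hk : (List.count "repo" cal : Int) = (cal.count "repo" : Int) := rfl
  have hfd : PySem.Int.floordiv (-(cal.count "repo" : Int) * ((cal.count "repo" : Int) + 1)) 2
      = -pvTri (cal.count "repo") := by
    set k := cal.count "repo" with hkdef
    have h2 : k * (k + 1) % 2 = 0 := Nat.even_iff.mp (Nat.even_mul_succ_self k)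
    rw [PySem.Int.floordiv_eq_iff_of_pos (by omega)]
    unfold pvTri
    push_cast
    constructor <;> [skip; skip] <;>
      (have := Nat.div_mul_cancel (Nat.dvd_of_mod_eq_zero h2) ; push_cast at this; nlinarith [this])
  simp only [pvAdj, hfd]
  cases h : (cal.zip cal.tail).any (fun p => p.1 == "repo" && p.2 == "repo") <;> simp
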